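-- pv_equiv track=rewrite | github.com/IES-Rafael-Alberti/dawb1-2425-ejercicios-u2-falbmun0906 | src/ej22_08.py | hacer_triangulo
-- ===== SOURCE A (Python) =====
-- def hacer_triangulo(numero):
--     fila = ""
--     triangulo = ""
--
--     for i in range(1, numero + 1):
--         if i % 2 != 0:
--             fila += str(i)[::-1] + " "
--             triangulo += fila[::-1] + "\n"
--     triangulo = triangulo[:-1]
--
--     return triangulo
-- ===== SOURCE B (Python) =====
-- def hacer_triangulo(numero):
--     odds = [x for x in range(1, numero + 1) if x % 2 != 0]
--     strs = [str(x) for x in odds]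
--     rows = [" " + " ".join(strs[k::-1]) for k in range(len(strs))]
--     return "\n".join(rows)
-- ===== Notes on version B (the rewrite author's own statement) =====
-- stated objective: simpler
-- what changed: B builds the list of odd numbers once and joins each descending row directly from a reversed prefix of it, instead of A's cumulative string with per-number digit reversal, whole-string mirror reversal per row, and a trailing-newline chop.
import Mathlib
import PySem

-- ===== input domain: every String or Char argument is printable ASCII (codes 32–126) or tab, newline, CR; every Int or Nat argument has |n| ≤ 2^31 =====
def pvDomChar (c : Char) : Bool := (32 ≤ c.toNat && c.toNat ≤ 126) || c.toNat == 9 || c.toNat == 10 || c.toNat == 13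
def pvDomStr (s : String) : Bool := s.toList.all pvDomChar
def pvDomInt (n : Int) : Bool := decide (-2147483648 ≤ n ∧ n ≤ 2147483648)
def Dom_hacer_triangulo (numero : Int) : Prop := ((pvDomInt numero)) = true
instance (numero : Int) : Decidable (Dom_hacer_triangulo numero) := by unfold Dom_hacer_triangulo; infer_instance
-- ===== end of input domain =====

-- B replaces A's cumulative string with double reversal by joining each row from a reversed prefix of the odds list (simpler decomposition).

-- ===== PORT A =====
-- A's fila/triangulo strings are carried as List Char (PySem string ops are defined on List Char);
-- str(i)[::-1] is (toChars i).reverse (PySem.Chars.slice?_none_none_neg_one), fila[::-1] is .reverse,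
-- triangulo[:-1] is .dropLast (PySem.List.slice_to_neg_one).
def hacer_triangulo (numero : Int) : String :=
  let st := (PySem.List.pyRange 1 (numero + 1) 1).foldl
    (fun (st : List Char × List Char) i =>
      if PySem.Int.mod i 2 ≠ 0 then
        let fila := st.1 ++ (PySem.Int.toChars i).reverse ++ [' ']
        (fila, st.2 ++ fila.reverse ++ ['\n'])
      else st) ([], [])
  String.ofList st.2.dropLast

-- ===== PORT B =====
-- strs[k::-1] for 0 ≤ k < len(strs) is exactly (strs.take (k+1)).reverse (reverse of the prefix through k)
def hacer_triangulo_alt (numero : Int) : String :=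
  let odds := (PySem.List.pyRange 1 (numero + 1) 1).filter (fun x => PySem.Int.mod x 2 ≠ 0)
  let strs := odds.map PySem.Int.toChars
  let rows := (List.range strs.length).map (fun k =>
    ' ' :: PySem.Chars.join [' '] ((strs.take (k + 1)).reverse))
  String.ofList (PySem.Chars.join ['\n'] rows)

-- ===== PRECONDITION & SPEC =====
def Spec_hacer_triangulo (numero : Int) (out : String) : Prop := out = hacer_triangulo_alt numero
instance (numero : Int) (out : String) : Decidable (Spec_hacer_triangulo numero out) := by unfold Spec_hacer_triangulo; infer_instance

-- ===== CLAIM (what is proved, stated in full; the proofs are below) =====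
def Claim_equal_hacer_triangulo : Prop := ∀ (numero : Int), Dom_hacer_triangulo numero → Spec_hacer_triangulo numero (hacer_triangulo numero)

-- ===== LEMMAS AND PROOFS =====

-- fila after processing the odd numbers os
def pvFila (os : List Int) : List Char :=
  os.flatMap (fun o => (PySem.Int.toChars o).reverse ++ [' '])

-- triangulo (with trailing newline per row) after processing the odd numbers os
def pvTri (os : List Int) : List Char :=
  (List.range os.length).flatMap (fun k => (pvFila (os.take (k + 1))).reverse ++ ['\n'])

-- B's rows as a function of the odds list
def pvRows (os : List Int) : List (List Char) :=
  (List.range (os.map PySem.Int.toChars).length).map (fun k =>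
    ' ' :: PySem.Chars.join [' '] (((os.map PySem.Int.toChars).take (k + 1)).reverse))

theorem pvFila_append (os : List Int) (o : Int) :
    pvFila (os ++ [o]) = pvFila os ++ ((PySem.Int.toChars o).reverse ++ [' ']) := by
  simp [pvFila]

theorem pvTri_append (os : List Int) (o : Int) :
    pvTri (os ++ [o]) = pvTri os ++ ((pvFila (os ++ [o])).reverse ++ ['\n']) := by
  unfold pvTri
  rw [List.length_append, List.length_singleton, List.range_succ, List.flatMap_append]
  congr 1
  · apply List.flatMap_congr
    intro k hk
    rw [List.mem_range] at hk
    rw [List.take_append_of_le_length (by omega)]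
  · simp only [List.flatMap_cons, List.flatMap_nil, List.append_nil]
    rw [List.take_of_length_le (by simp)]

theorem pvLoopA (n : Nat) :
    ((PySem.List.pyRange 1 ((n : Int) + 1) 1).foldl
      (fun (st : List Char × List Char) i =>
        if PySem.Int.mod i 2 ≠ 0 then
          let fila := st.1 ++ (PySem.Int.toChars i).reverse ++ [' ']
          (fila, st.2 ++ fila.reverse ++ ['\n'])
        else st) ([], []))
    = (pvFila ((PySem.List.pyRange 1 ((n : Int) + 1) 1).filter (fun x => PySem.Int.mod x 2 ≠ 0)),
       pvTri ((PySem.List.pyRange 1 ((n : Int) + 1) 1).filter (fun x => PySem.Int.mod x 2 ≠ 0))) := by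
  induction n with
  | zero =>
      rw [PySem.List.pyRange_one_eq_nil (by norm_num)]
      simp [pvFila, pvTri]
  | succ m ih =>
      have hsplit : PySem.List.pyRange 1 ((m : Int) + 1 + 1) 1
          = PySem.List.pyRange 1 ((m : Int) + 1) 1 ++ [(m : Int) + 1] := by
        exact_mod_cast PySem.List.pyRange_one_succ_right (a := 1) (b := (m : Int) + 1) (by omega)
      push_cast
      rw [hsplit, List.foldl_append, ih, List.filter_append]
      by_cases h : PySem.Int.mod ((m : Int) + 1) 2 ≠ 0
      · simp only [List.foldl_cons, List.foldl_nil, if_pos h, List.filter_cons,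
          List.filter_nil, decide_eq_true h, if_true]
        rw [pvFila_append, pvTri_append, pvFila_append]
        simp [List.append_assoc]
      · simp only [List.foldl_cons, List.foldl_nil, if_neg h, List.filter_cons,
          List.filter_nil, decide_eq_false h, Bool.false_eq_true, if_false,
          List.append_nil]

-- a nonempty descending row, written A's way (mirrored fila) and B's way (space + join)
theorem pvRow_eq (p : List Int) (hp : p ≠ []) :
    (pvFila p).reverse
      = ' ' :: PySem.Chars.join [' '] ((p.reverse).map PySem.Int.toChars) := by
  have key : ∀ (l : List Int), l ≠ [] →
      l.flatMap (fun o => ' ' :: PySem.Int.toChars o)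
        = ' ' :: PySem.Chars.join [' '] (l.map PySem.Int.toChars) := by
    intro l
    induction l with
    | nil => intro h; exact absurd rfl h
    | cons a t ih =>
        intro _
        cases t with
        | nil => simp [PySem.Chars.join_singleton]
        | cons b t' =>
            rw [List.flatMap_cons, ih (by simp)]
            simp only [List.map_cons]
            rw [PySem.Chars.join_cons_cons]
            simp
  rw [pvFila, List.reverse_flatMap, ← key p.reverse (by simpa using hp)]
  apply List.flatMap_congr
  intro o _
  simp

-- chopping the final '\n' of the concatenated rows-with-newlines is joining the rows with '\n'
theorem pvDropLast_join (rs : List (List Char)) :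
    (rs.flatMap (fun r => r ++ ['\n'])).dropLast = PySem.Chars.join ['\n'] rs := by
  induction rs with
  | nil => simp [PySem.Chars.join_nil]
  | cons r t ih =>
      cases t with
      | nil => simp [PySem.Chars.join_singleton]
      | cons r' t' =>
          have hne : (r' :: t').flatMap (fun r => r ++ ['\n']) ≠ [] := by
            simp [List.flatMap_cons]
          rw [List.flatMap_cons, List.dropLast_append_of_ne_nil hne, ih,
            PySem.Chars.join_cons_cons]

theorem pvTri_dropLast (os : List Int) :
    (pvTri os).dropLast = PySem.Chars.join ['\n'] (pvRows os) := by
  have : pvTri os = (pvRows os).flatMap (fun r => r ++ ['\n']) := by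
    unfold pvTri pvRows
    rw [List.flatMap_map, List.length_map]
    apply List.flatMap_congr
    intro k hk
    rw [List.mem_range] at hk
    rw [pvRow_eq _ (by
      intro h
      have h2 : min (k + 1) os.length = 0 := by
        simpa [List.length_take] using congrArg List.length h
      omega)]
    simp [List.map_take, List.map_reverse]
  rw [this, pvDropLast_join]

-- ===== VERDICT (by name: the statement is the Claim_ definition above) =====
theorem hacer_triangulo_spec : Claim_equal_hacer_triangulo := by
  intro numero _
  unfold Spec_hacer_triangulo hacer_triangulo hacer_triangulo_alt
  by_cases hneg : numero < 0
  · rw [PySem.List.pyRange_one_eq_nil (by omega)]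
    simp [PySem.Chars.join_nil]
  · obtain ⟨n, rfl⟩ : ∃ n : Nat, numero = (n : Int) :=
      ⟨numero.toNat, (Int.toNat_of_nonneg (by omega)).symm⟩
    rw [pvLoopA n]
    exact congrArg String.ofList (pvTri_dropLast _)
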